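-- pv_equiv track=rewrite | github.com/cdfox05/CSE115_Projects | Labs/cdfox2@buffalo.edu_6_main.py | running_length
-- ===== SOURCE A (Python) =====
-- def running_length(al):
--     intL = []
--     for x in range(len(al)):
--         sum = len(al[x])
--         if (len(intL) >= 1):
--             for y in range(len(intL)):
--                 sum += len(al[y])
--         intL.append(sum)
--     return intL
-- ===== SOURCE B (Python) =====
-- def running_length(al):
--     out = []
--     total = 0
--     for s in al:
--         total += len(s)
--         out.append(total)
--     return out
-- ===== Notes on version B (the rewrite author's own statement) =====
-- stated objective: faster
-- what changed: Replaced the quadratic rebuild of each prefix (inner loop re-summing all earlier element lengths) by a single pass that carries one running total of lengths.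
import Mathlib
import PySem

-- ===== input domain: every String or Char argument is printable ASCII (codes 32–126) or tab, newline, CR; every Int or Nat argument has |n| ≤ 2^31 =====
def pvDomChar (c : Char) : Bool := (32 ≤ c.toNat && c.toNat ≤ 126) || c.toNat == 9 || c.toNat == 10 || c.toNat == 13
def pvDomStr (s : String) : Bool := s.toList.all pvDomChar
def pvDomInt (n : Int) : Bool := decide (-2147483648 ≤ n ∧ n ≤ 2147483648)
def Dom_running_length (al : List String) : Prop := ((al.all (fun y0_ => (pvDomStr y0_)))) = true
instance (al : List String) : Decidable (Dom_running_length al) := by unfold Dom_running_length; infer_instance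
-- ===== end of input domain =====

-- B replaces A's quadratic inner re-summing of earlier element lengths by one pass with a running total (measured asymptotically faster).


-- ===== PORT A =====
-- index x/y always lies in range(len(al)), so pyGetD with default "" is exact here
def running_length (al : List String) : List Int :=
  (PySem.List.pyRange 0 (PySem.List.len al) 1).foldl (fun intL x =>
    let sum0 : Int := PySem.Str.len (PySem.List.pyGetD al x "")
    let sum1 : Int :=
      if PySem.List.len intL ≥ 1 then
        (PySem.List.pyRange 0 (PySem.List.len intL) 1).foldl
          (fun s y => s + PySem.Str.len (PySem.List.pyGetD al y "")) sum0
      else sum0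
    intL ++ [sum1]) []

-- ===== PORT B =====
def running_length_alt (al : List String) : List Int :=
  (al.foldl (fun (p : List Int × Int) s =>
      let t := p.2 + PySem.Str.len s
      (p.1 ++ [t], t)) ([], 0)).1

-- ===== PRECONDITION & SPEC =====
def Spec_running_length (al : List String) (out : List Int) : Prop := out = running_length_alt al
instance (al : List String) (out : List Int) : Decidable (Spec_running_length al out) := by unfold Spec_running_length; infer_instance

-- ===== CLAIM (what is proved, stated in full; the proofs are below) =====
def Claim_equal_running_length : Prop := ∀ (al : List String), Dom_running_length al → Spec_running_length al (running_length al)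

-- ===== LEMMAS AND PROOFS =====

-- prefix sums of lengths starting from running total t
def pvPS (al : List String) (t : Int) : List Int :=
  match al with
  | [] => []
  | s :: r => (t + PySem.Str.len s) :: pvPS r (t + PySem.Str.len s)

theorem pvPS_length (al : List String) (t : Int) : (pvPS al t).length = al.length := by
  induction al generalizing t with
  | nil => rfl
  | cons s r ih => simp [pvPS, ih]

theorem pvPS_append_singleton (al : List String) (x : String) (t : Int) :
    pvPS (al ++ [x]) t = pvPS al t ++ [t + ((al.map PySem.Str.len).sum + PySem.Str.len x)] := by
  induction al generalizing t with
  | nil => simp [pvPS]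
  | cons s r ih => simp [pvPS, ih]; ring_nf

theorem pvB_invariant (al : List String) (out : List Int) (t : Int) :
    (al.foldl (fun (p : List Int × Int) s =>
      let u := p.2 + PySem.Str.len s
      (p.1 ++ [u], u)) (out, t)).1 = out ++ pvPS al t := by
  induction al generalizing out t with
  | nil => simp [pvPS]
  | cons s r ih =>
    simpa [pvPS] using ih (out ++ [t + PySem.Str.len s]) (t + PySem.Str.len s)

theorem pvInner_sum (al : List String) (n : Nat) (hn : n ≤ al.length) (c : Int) :
    (PySem.List.pyRange 0 (n : Int) 1).foldl
      (fun s y => s + PySem.Str.len (PySem.List.pyGetD al y "")) c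
    = c + ((al.map PySem.Str.len).take n).sum := by
  induction n generalizing c with
  | zero => simp [PySem.List.pyRange_one_eq_nil]
  | succ m ih =>
    rw [show ((m + 1 : Nat) : Int) = (m : Int) + 1 by push_cast; ring,
        PySem.List.pyRange_one_succ_right (by positivity), List.foldl_append]
    rw [ih (by omega)]
    have hm : m < al.length := by omega
    have hmm : m < (al.map PySem.Str.len).length := by simpa using hm
    rw [List.take_add_one, List.getElem?_eq_getElem hmm]
    simp [PySem.List.pyGetD_natCast, List.getD, List.getElem?_eq_getElem hm]
    ring

theorem pvA_take (al : List String) (n : Nat) (hn : n ≤ al.length) :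
    (PySem.List.pyRange 0 (n : Int) 1).foldl (fun intL x =>
      let sum0 : Int := PySem.Str.len (PySem.List.pyGetD al x "")
      let sum1 : Int :=
        if PySem.List.len intL ≥ 1 then
          (PySem.List.pyRange 0 (PySem.List.len intL) 1).foldl
            (fun s y => s + PySem.Str.len (PySem.List.pyGetD al y "")) sum0
        else sum0
      intL ++ [sum1]) []
    = pvPS (al.take n) 0 := by
  induction n with
  | zero => simp [PySem.List.pyRange_one_eq_nil, pvPS]
  | succ m ih =>
    rw [show ((m + 1 : Nat) : Int) = (m : Int) + 1 by push_cast; ring,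
        PySem.List.pyRange_one_succ_right (by positivity), List.foldl_append,
        ih (by omega)]
    have hm : m < al.length := by omega
    have hlen : (pvPS (al.take m) 0).length = m := by
      rw [pvPS_length, List.length_take]; omega
    rw [List.take_add_one, List.getElem?_eq_getElem hm]
    simp only [List.foldl_cons, List.foldl_nil, Option.toList_some]
    by_cases hm0 : m = 0
    · subst hm0
      simp [pvPS, PySem.List.len, PySem.List.pyGetD_zero, List.getD,
            List.getElem?_eq_getElem hm]
    · have h1 : PySem.List.len (pvPS (al.take m) 0) ≥ 1 := by
        simp [PySem.List.len, hlen]; omega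
      rw [if_pos h1]
      have hl : PySem.List.len (pvPS (al.take m) 0) = (m : Int) := by
        simp [PySem.List.len, hlen]
      rw [hl, pvInner_sum al m (by omega)]
      rw [pvPS_append_singleton]
      simp [PySem.List.pyGetD_natCast, List.getD, List.getElem?_eq_getElem hm,
            List.map_take]
      ring_nf

-- ===== VERDICT (by name: the statement is the Claim_ definition above) =====
theorem running_length_spec : Claim_equal_running_length := by
  intro al _
  unfold Spec_running_length running_length running_length_alt
  have hA := pvA_take al al.length (le_refl _)
  simp only [List.take_length] at hA
  rw [pvB_invariant al [] 0, List.nil_append]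
  simpa [PySem.List.len] using hA
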